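-- pv_equiv track=rewrite | github.com/DavidCheuk/PlugPipe-Plugins | plugs/core/dependency_manager/1.0.0/main.py | _sanitize_command_args
-- ===== SOURCE A (Python) =====
-- from typing import Dict, Any, List, Optional, Tuple
--
-- def _sanitize_command_args(args: List[str]) -> List[str]:
--     """Sanitize command arguments to prevent injection."""
--     sanitized = []
--
--     for arg in args:
--         if not isinstance(arg, str):
--             continue
--
--         # Remove dangerous characters
--         dangerous_chars = [';', '|', '&', '`', '$', '(', ')', '{', '}', '<', '>']
--         sanitized_arg = arg
--         for char in dangerous_chars:
--             sanitized_arg = sanitized_arg.replace(char, '')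
--
--         # Remove shell injection patterns
--         injection_patterns = ['&&', '||', '$(', '`']
--         for pattern in injection_patterns:
--             sanitized_arg = sanitized_arg.replace(pattern, '')
--
--         sanitized.append(sanitized_arg)
--
--     return sanitized
-- ===== SOURCE B (Python) =====
-- from typing import Dict, Any, List, Optional, Tuple
--
-- _DANGEROUS = frozenset(';|&`$(){}<>')
--
-- def _sanitize_command_args(args: List[str]) -> List[str]:
--     """Sanitize command arguments to prevent injection (single-pass character filter)."""
--     sanitized = []
--     for arg in args:
--         if not isinstance(arg, str):
--             continue
--         sanitized.append(''.join(ch for ch in arg if ch not in _DANGEROUS))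
--     return sanitized
-- ===== Notes on version B (the rewrite author's own statement) =====
-- stated objective: simpler
-- what changed: Replaces A's 11 sequential whole-string .replace passes plus a second (provably dead) injection-pattern replace loop with one single-pass character filter against a frozenset; the pattern loop is dropped because every pattern consists solely of already-removed characters, so it can never match.
import Mathlib
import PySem

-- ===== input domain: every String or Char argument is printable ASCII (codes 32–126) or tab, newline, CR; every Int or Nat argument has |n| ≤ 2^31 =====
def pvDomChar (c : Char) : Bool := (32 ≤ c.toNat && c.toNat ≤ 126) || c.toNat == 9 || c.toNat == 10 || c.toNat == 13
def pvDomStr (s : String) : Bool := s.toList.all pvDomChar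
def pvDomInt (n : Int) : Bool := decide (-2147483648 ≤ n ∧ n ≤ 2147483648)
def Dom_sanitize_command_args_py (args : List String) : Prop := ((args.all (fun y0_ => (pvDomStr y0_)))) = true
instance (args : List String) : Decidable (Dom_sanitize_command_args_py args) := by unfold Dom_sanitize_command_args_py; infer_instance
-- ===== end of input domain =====

-- B replaces A's 11 sequential whole-string .replace passes (plus a provably dead
-- injection-pattern replace loop) with one single-pass character filter; objective: simpler.

-- ===== PORT A =====
-- the literal lists A builds inside the loop
def pvDangerousChars : List String := [";", "|", "&", "`", "$", "(", ")", "{", "}", "<", ">"]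
def pvInjectionPatterns : List String := ["&&", "||", "$(", "`"]

def sanitize_command_args_py (args : List String) : List String :=
  args.foldl (fun sanitized arg =>
    -- isinstance(arg, str) is always true under the type convention (all elements are strings)
    let sanitized_arg := pvDangerousChars.foldl (fun s ch => PySem.Str.replace s ch "") arg
    let sanitized_arg := pvInjectionPatterns.foldl (fun s p => PySem.Str.replace s p "") sanitized_arg
    sanitized ++ [sanitized_arg]) []

-- ===== PORT B =====
def pvDanger : List Char := [';', '|', '&', '`', '$', '(', ')', '{', '}', '<', '>']

def sanitize_command_args_py_alt (args : List String) : List String :=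
  args.foldl (fun sanitized arg =>
    sanitized ++ [String.ofList (arg.toList.filter (fun c => !pvDanger.contains c))]) []

-- ===== PRECONDITION & SPEC =====
def Spec_sanitize_command_args_py (args : List String) (out : List String) : Prop := out = sanitize_command_args_py_alt args
instance (args : List String) (out : List String) : Decidable (Spec_sanitize_command_args_py args out) := by unfold Spec_sanitize_command_args_py; infer_instance

-- ===== CLAIM (what is proved, stated in full; the proofs are below) =====
def Claim_equal_sanitize_command_args_py : Prop := ∀ (args : List String), Dom_sanitize_command_args_py args → Spec_sanitize_command_args_py args (sanitize_command_args_py args)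

-- ===== LEMMAS AND PROOFS =====

-- replace.go with a single-char pattern and empty replacement is a character filter
lemma pv_go_single (c : Char) : ∀ (l : List Char) (fuel : Nat) (acc : List Char), l.length ≤ fuel →
    PySem.Chars.replace.go [c] [] fuel l acc = acc.reverse ++ l.filter (· ≠ c) := by
  intro l
  induction l with
  | nil =>
    intro fuel acc _
    rw [PySem.Chars.replace.go.eq_def]
    rcases fuel with _ | f <;> simp
  | cons c' t ih =>
    intro fuel acc h
    rcases fuel with _ | f
    · simp at h
    rw [PySem.Chars.replace.go.eq_def]
    simp only [List.isPrefixOf]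
    by_cases hc : c = c'
    · subst hc
      simp only [BEq.rfl, Bool.true_and, if_true,
        List.length_cons, List.length_nil, List.drop_succ_cons, List.drop_zero,
        List.reverse_nil, List.nil_append]
      rw [ih f acc (by simpa using h)]
      simp
    · have hbe : (c == c') = false := by simp [hc]
      simp only [hbe, Bool.false_and, Bool.false_eq_true, if_false]
      rw [ih f (c' :: acc) (by simpa using h)]
      simp [Ne.symm hc]

-- replace.go never fires when the pattern's first character is absent from the string
lemma pv_go_nomatch (a : Char) (rest : List Char) : ∀ (l : List Char) (fuel : Nat) (acc : List Char),
    a ∉ l → l.length ≤ fuel →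
    PySem.Chars.replace.go (a :: rest) [] fuel l acc = acc.reverse ++ l := by
  intro l
  induction l with
  | nil =>
    intro fuel acc _ _
    rw [PySem.Chars.replace.go.eq_def]
    rcases fuel with _ | f <;> simp
  | cons c' t ih =>
    intro fuel acc hmem h
    rcases fuel with _ | f
    · simp at h
    rw [PySem.Chars.replace.go.eq_def]
    have hne : (a == c') = false := by simp; rintro rfl; exact hmem (List.mem_cons_self)
    simp only [List.isPrefixOf, hne, Bool.false_and, Bool.false_eq_true, if_false]
    rw [ih f (c' :: acc) (fun hm => hmem (List.mem_cons_of_mem _ hm)) (by simpa using h)]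
    simp

lemma pv_strReplace_single (s : String) (ch : String) (c : Char) (h : ch.toList = [c]) :
    PySem.Str.replace s ch "" = String.ofList (s.toList.filter (· ≠ c)) := by
  simp only [PySem.Str.replace, h, PySem.Chars.replace]
  norm_num
  rw [← String.length_toList, pv_go_single c s.toList s.toList.length [] le_rfl]
  simp

-- the 11 sequential single-character replaces collapse to one filter over the char list
lemma pv_fold_replace_chars : ∀ (chs : List String) (cl : List Char),
    chs.map String.toList = cl.map ([·]) →
    ∀ (s : String), chs.foldl (fun s ch => PySem.Str.replace s ch "") s
      = String.ofList (s.toList.filter (fun c => !cl.contains c)) := by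
  intro chs
  induction chs with
  | nil =>
    intro cl hmap s
    have : cl = [] := by cases cl <;> simp_all
    subst this
    simp [String.ofList_toList]
  | cons ch chs' ih =>
    intro cl hmap s
    cases cl with
    | nil => simp at hmap
    | cons c cl' =>
      simp only [List.map_cons, List.cons.injEq] at hmap
      obtain ⟨hch, hrest⟩ := hmap
      simp only [List.foldl_cons]
      rw [pv_strReplace_single s ch c hch, ih cl' hrest]
      congr 1
      rw [String.toList_ofList, List.filter_filter]
      apply List.filter_congr
      intro a _
      simp only [List.contains_cons, Bool.not_or]
      cases h : (a == c) <;> simp_all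

-- a pattern whose first character is absent from the string leaves it unchanged
lemma pv_replace_pattern_id (s : String) (p : String) (a : Char) (rest : List Char)
    (hp : p.toList = a :: rest) (h : a ∉ s.toList) :
    PySem.Str.replace s p "" = s := by
  simp only [PySem.Str.replace, hp, PySem.Chars.replace]
  norm_num
  rw [← String.length_toList, pv_go_nomatch a rest s.toList s.toList.length [] h le_rfl]
  simp [String.ofList_toList]

-- removed characters are really gone
lemma pv_not_mem_filter (s : String) (a : Char) (ha : pvDanger.contains a = true) :
    a ∉ (String.ofList (s.toList.filter (fun c => !pvDanger.contains c))).toList := by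
  rw [String.toList_ofList]
  intro hmem
  have := List.of_mem_filter hmem
  simp_all

-- the whole per-argument sanitisation of A equals B's single filter
lemma pv_arg_eq (arg : String) :
    pvInjectionPatterns.foldl (fun s p => PySem.Str.replace s p "")
      (pvDangerousChars.foldl (fun s ch => PySem.Str.replace s ch "") arg)
    = String.ofList (arg.toList.filter (fun c => !pvDanger.contains c)) := by
  rw [pv_fold_replace_chars pvDangerousChars pvDanger (by decide) arg]
  simp only [pvInjectionPatterns, List.foldl_cons, List.foldl_nil]
  rw [pv_replace_pattern_id _ "&&" '&' ['&'] (by decide) (pv_not_mem_filter arg '&' (by decide)),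
      pv_replace_pattern_id _ "||" '|' ['|'] (by decide) (pv_not_mem_filter arg '|' (by decide)),
      pv_replace_pattern_id _ "$(" '$' ['('] (by decide) (pv_not_mem_filter arg '$' (by decide)),
      pv_replace_pattern_id _ "`" '`' [] (by decide) (pv_not_mem_filter arg '`' (by decide))]

lemma pv_fold_eq (args : List String) : ∀ (acc : List String),
    args.foldl (fun sanitized arg =>
      let sanitized_arg := pvDangerousChars.foldl (fun s ch => PySem.Str.replace s ch "") arg
      let sanitized_arg := pvInjectionPatterns.foldl (fun s p => PySem.Str.replace s p "") sanitized_arg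
      sanitized ++ [sanitized_arg]) acc
    = args.foldl (fun sanitized arg =>
        sanitized ++ [String.ofList (arg.toList.filter (fun c => !pvDanger.contains c))]) acc := by
  induction args with
  | nil => intro acc; simp only [List.foldl_nil]
  | cons a t ih =>
    intro acc
    simp only [List.foldl_cons]
    have h1 : (let sanitized_arg := pvDangerousChars.foldl (fun s ch => PySem.Str.replace s ch "") a
               let sanitized_arg := pvInjectionPatterns.foldl (fun s p => PySem.Str.replace s p "") sanitized_arg
               acc ++ [sanitized_arg])
        = acc ++ [String.ofList (a.toList.filter (fun c => !pvDanger.contains c))] :=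
      congrArg (fun x => acc ++ [x]) (pv_arg_eq a)
    rw [h1]
    exact ih _

-- ===== VERDICT (by name: the statement is the Claim_ definition above) =====
theorem sanitize_command_args_py_spec : Claim_equal_sanitize_command_args_py := by
  intro args _
  unfold Spec_sanitize_command_args_py sanitize_command_args_py sanitize_command_args_py_alt
  exact pv_fold_eq args []
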